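-- pv_equiv track=rewrite | github.com/shuvabrata/project-graph | simulation/layer8/generate_data.py | generate_pr_title
-- ===== SOURCE A (Python) =====
-- def generate_pr_title(repo_name, commit_messages):
--     """Generate PR title based on commits."""
--     templates = [
--         "feat: {feature}",
--         "fix: {fix}",
--         "refactor: {refactor}",
--         "docs: {docs}",
--         "perf: {perf}",
--         "test: {test}",
--     ]
--
--     # Extract action from commits
--     if any("Fix" in msg or "fix" in msg for msg in commit_messages):
--         return f"fix: Resolve issues in {repo_name.split('/')[-1]}"
--     elif any("Add" in msg or "Implement" in msg for msg in commit_messages):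
--         return f"feat: Add new functionality to {repo_name.split('/')[-1]}"
--     elif any("Update" in msg for msg in commit_messages):
--         return f"chore: Update {repo_name.split('/')[-1]} components"
--     elif any("Refactor" in msg for msg in commit_messages):
--         return f"refactor: Improve {repo_name.split('/')[-1]} code structure"
--     else:
--         return f"feat: Enhance {repo_name.split('/')[-1]}"
-- ===== SOURCE B (Python) =====
-- KEYWORD_GROUPS = [("Fix", "fix"), ("Add", "Implement"), ("Update",), ("Refactor",)]
--
-- TITLES = [
--     ("fix: Resolve issues in ", ""),
--     ("feat: Add new functionality to ", ""),
--     ("chore: Update ", " components"),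
--     ("refactor: Improve ", " code structure"),
--     ("feat: Enhance ", ""),
-- ]
--
--
-- def _rank(msg):
--     """Index of the first keyword group matching msg, or len(KEYWORD_GROUPS)."""
--     for r, kws in enumerate(KEYWORD_GROUPS):
--         if any(k in msg for k in kws):
--             return r
--     return len(KEYWORD_GROUPS)
--
--
-- def generate_pr_title(repo_name, commit_messages):
--     """Generate PR title based on commits: rank each message, pick the best rank."""
--     best = min(map(_rank, commit_messages), default=len(KEYWORD_GROUPS))
--     prefix, suffix = TITLES[best]
--     return prefix + repo_name.split('/')[-1] + suffix
-- ===== Notes on version B (the rewrite author's own statement) =====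
-- stated objective: alternative
-- what changed: Replaces four cascaded any()-scans with a data-driven algorithm: every message is assigned a numeric rank by scanning a keyword-group table, the minimum rank over all messages is taken, and the result is a prefix/suffix table lookup by that rank instead of an if/elif chain of format strings.
import Mathlib
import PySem

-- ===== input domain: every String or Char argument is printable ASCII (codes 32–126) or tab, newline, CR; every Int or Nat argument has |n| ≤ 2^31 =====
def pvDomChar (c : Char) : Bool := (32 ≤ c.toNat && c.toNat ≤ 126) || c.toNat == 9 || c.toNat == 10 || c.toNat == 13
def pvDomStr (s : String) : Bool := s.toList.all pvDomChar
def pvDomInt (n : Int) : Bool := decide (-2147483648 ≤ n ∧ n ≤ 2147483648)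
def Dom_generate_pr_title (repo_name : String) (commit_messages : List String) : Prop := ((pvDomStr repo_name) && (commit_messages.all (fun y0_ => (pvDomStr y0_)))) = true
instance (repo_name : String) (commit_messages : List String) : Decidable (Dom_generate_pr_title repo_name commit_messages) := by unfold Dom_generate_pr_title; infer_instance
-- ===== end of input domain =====

-- B replaces A's cascade of four any(...) scans by a data-driven algorithm: each message gets a
-- numeric rank from a keyword-group table, the minimum rank is taken, and the title is a table
-- lookup by that rank (objective: alternative).

-- ===== PORT A =====
-- repo_name.split('/')[-1]: split('/') always yields a nonempty list, so [-1] is its last element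
def pvRepoBase (repo_name : String) : String :=
  String.ofList ((PySem.Chars.splitOn repo_name.toList ['/']).getLast?.getD [])

def generate_pr_title (repo_name : String) (commit_messages : List String) : String :=
  -- the Python `templates` list is built and never used; it does not affect the result
  if commit_messages.any (fun msg => PySem.Str.isIn "Fix" msg || PySem.Str.isIn "fix" msg) then
    "fix: Resolve issues in " ++ pvRepoBase repo_name
  else if commit_messages.any (fun msg => PySem.Str.isIn "Add" msg || PySem.Str.isIn "Implement" msg) then
    "feat: Add new functionality to " ++ pvRepoBase repo_name
  else if commit_messages.any (fun msg => PySem.Str.isIn "Update" msg) then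
    "chore: Update " ++ pvRepoBase repo_name ++ " components"
  else if commit_messages.any (fun msg => PySem.Str.isIn "Refactor" msg) then
    "refactor: Improve " ++ pvRepoBase repo_name ++ " code structure"
  else
    "feat: Enhance " ++ pvRepoBase repo_name

-- ===== PORT B =====
def pvKeywordGroups : List (List String) := [["Fix", "fix"], ["Add", "Implement"], ["Update"], ["Refactor"]]

def pvTitles : List (String × String) :=
  [("fix: Resolve issues in ", ""),
   ("feat: Add new functionality to ", ""),
   ("chore: Update ", " components"),
   ("refactor: Improve ", " code structure"),
   ("feat: Enhance ", "")]

-- _rank: the enumerate loop over KEYWORD_GROUPS, `r` the running index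
def pvRankAux (groups : List (List String)) (r : Nat) (msg : String) : Nat :=
  match groups with
  | [] => 4  -- len(KEYWORD_GROUPS)
  | kws :: rest => if kws.any (fun k => PySem.Str.isIn k msg) then r else pvRankAux rest (r + 1) msg

def pvRank (msg : String) : Nat := pvRankAux pvKeywordGroups 0 msg

def generate_pr_title_alt (repo_name : String) (commit_messages : List String) : String :=
  -- min(map(_rank, commit_messages), default=4)
  let best : Nat :=
    match commit_messages.map pvRank with
    | [] => 4
    | x :: xs => xs.foldl min x
  -- TITLES[best]; best ≤ 4 always, so the lookup is in range
  let t := pvTitles.getD best ("", "")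
  t.1 ++ pvRepoBase repo_name ++ t.2

-- ===== PRECONDITION & SPEC =====
def Spec_generate_pr_title (repo_name : String) (commit_messages : List String) (out : String) : Prop := out = generate_pr_title_alt repo_name commit_messages
instance (repo_name : String) (commit_messages : List String) (out : String) : Decidable (Spec_generate_pr_title repo_name commit_messages out) := by unfold Spec_generate_pr_title; infer_instance

-- ===== CLAIM (what is proved, stated in full; the proofs are below) =====
def Claim_equal_generate_pr_title : Prop := ∀ (repo_name : String) (commit_messages : List String), Dom_generate_pr_title repo_name commit_messages → Spec_generate_pr_title repo_name commit_messages (generate_pr_title repo_name commit_messages)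

-- ===== LEMMAS AND PROOFS =====

-- the priority value A's if/elif cascade selects, as a number
def pvR (ms : List String) : Nat :=
  if ms.any (fun msg => PySem.Str.isIn "Fix" msg || PySem.Str.isIn "fix" msg) then 0
  else if ms.any (fun msg => PySem.Str.isIn "Add" msg || PySem.Str.isIn "Implement" msg) then 1
  else if ms.any (fun msg => PySem.Str.isIn "Update" msg) then 2
  else if ms.any (fun msg => PySem.Str.isIn "Refactor" msg) then 3
  else 4

theorem pvRank_eq (m : String) :
    pvRank m =
      if PySem.Str.isIn "Fix" m || PySem.Str.isIn "fix" m then 0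
      else if PySem.Str.isIn "Add" m || PySem.Str.isIn "Implement" m then 1
      else if PySem.Str.isIn "Update" m then 2
      else if PySem.Str.isIn "Refactor" m then 3
      else 4 := by
  simp only [pvRank, pvKeywordGroups, pvRankAux, List.any_cons, List.any_nil,
    Bool.or_false, PySem.Str.isIn]
  split_ifs <;> simp_all

theorem pvRank_le (m : String) : pvRank m ≤ 4 := by
  rw [pvRank_eq]; split_ifs <;> omega

theorem pv_min_chain (b1 b2 b3 b4 c1 c2 c3 c4 : Bool) :
    min (if b1 then 0 else if b2 then 1 else if b3 then 2 else if b4 then 3 else 4)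
        (if c1 then 0 else if c2 then 1 else if c3 then 2 else if c4 then 3 else (4 : Nat))
      = (if (b1 || c1) then 0 else if (b2 || c2) then 1 else if (b3 || c3) then 2
         else if (b4 || c4) then 3 else 4) := by
  cases b1 <;> cases b2 <;> cases b3 <;> cases b4 <;>
    cases c1 <;> cases c2 <;> cases c3 <;> cases c4 <;> decide

theorem pv_foldl_min (ms : List String) (acc : Nat) (hacc : acc ≤ 4) :
    (ms.map pvRank).foldl min acc = min acc (pvR ms) := by
  induction ms generalizing acc with
  | nil => simp [pvR]; omega
  | cons m rest ih =>
    simp only [List.map_cons, List.foldl_cons]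
    rw [ih (min acc (pvRank m)) (le_trans (min_le_right _ _) (pvRank_le m))]
    rw [min_assoc]
    congr 1
    rw [pvRank_eq]
    simp only [pvR, List.any_cons]
    exact pv_min_chain _ _ _ _ _ _ _ _

theorem pv_best_eq (ms : List String) :
    (match ms.map pvRank with
     | [] => 4
     | x :: xs => xs.foldl min x) = pvR ms := by
  cases ms with
  | nil => simp [pvR]
  | cons m rest =>
    simp only [List.map_cons]
    rw [pv_foldl_min rest (pvRank m) (pvRank_le m), pvRank_eq]
    simp only [pvR, List.any_cons]
    exact pv_min_chain _ _ _ _ _ _ _ _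

-- ===== VERDICT (by name: the statement is the Claim_ definition above) =====
theorem generate_pr_title_spec : Claim_equal_generate_pr_title := by
  intro repo_name ms _
  show _ = _
  rw [generate_pr_title_alt]
  simp only [pv_best_eq]
  rw [generate_pr_title, pvR]
  split_ifs <;> simp [pvTitles]
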